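-- pv_equiv track=rewrite | github.com/Aditya21196/applied-crypt-project1 | decryption/preprocess.py | remove_duplicate_char_triplets
-- ===== SOURCE A (Python) =====
-- def remove_duplicate_char_triplets(ciphertext):
--     """
--     Takes in a ciphertext
--     returns a ciphertext with all duplicate character tripples or greater removed
--     """
--     processed_text = ciphertext[:2]
--     for i in range(2, len(ciphertext)):
--         char = ciphertext[i]
--         if char == ciphertext[i-1] and char == ciphertext[i-2]:
--             continue
--         processed_text += char
--     return processed_text
-- ===== SOURCE B (Python) =====
-- def remove_duplicate_char_triplets(ciphertext):
--     """
--     Takes in a ciphertext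
--     returns a ciphertext with all duplicate character tripples or greater removed
--     """
--     out = []
--     i = 0
--     n = len(ciphertext)
--     while i < n:
--         j = i
--         while j < n and ciphertext[j] == ciphertext[i]:
--             j += 1
--         out.append(ciphertext[i] * min(j - i, 2))
--         i = j
--     return ''.join(out)
-- ===== Notes on version B (the rewrite author's own statement) =====
-- stated objective: alternative
-- what changed: A scans index-by-index comparing each character with the two before it and skips repeats; B groups the string into maximal runs with a two-pointer pass and emits at most two copies of each run, joining the pieces at the end.
import Mathlib
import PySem

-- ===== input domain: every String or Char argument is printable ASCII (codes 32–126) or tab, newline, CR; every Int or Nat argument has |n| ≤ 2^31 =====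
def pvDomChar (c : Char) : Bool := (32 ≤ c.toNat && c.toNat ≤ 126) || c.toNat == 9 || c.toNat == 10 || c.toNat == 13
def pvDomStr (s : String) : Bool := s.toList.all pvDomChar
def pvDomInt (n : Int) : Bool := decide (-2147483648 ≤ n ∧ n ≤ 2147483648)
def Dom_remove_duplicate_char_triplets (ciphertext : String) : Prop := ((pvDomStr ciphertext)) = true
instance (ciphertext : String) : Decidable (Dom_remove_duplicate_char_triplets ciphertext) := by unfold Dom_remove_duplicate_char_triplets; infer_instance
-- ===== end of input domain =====

-- B replaces A's per-index lookbehind scan (compare each char with the two before it) by a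
-- run-grouping two-pointer pass that emits at most two copies of each maximal run (objective: alternative).

-- ===== PORT A =====
-- loop body: char = ciphertext[i]; skip it iff it equals ciphertext[i-1] and ciphertext[i-2]
-- (the three indices are always in range when i ∈ range(2, len); the `none` arm is unreachable)
def pvStepA (ciphertext : String) (acc : String) (i : Int) : String :=
  match PySem.Str.pyGet? ciphertext i, PySem.Str.pyGet? ciphertext (i - 1),
        PySem.Str.pyGet? ciphertext (i - 2) with
  | some c, some p1, some p2 => if c = p1 ∧ c = p2 then acc else acc.push c
  | _, _, _ => acc

def remove_duplicate_char_triplets (ciphertext : String) : String :=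
  (PySem.List.pyRange 2 (PySem.Str.len ciphertext)).foldl (pvStepA ciphertext)
    (PySem.Str.slice ciphertext none (some 2))

-- ===== PORT B =====
-- B's inner `while` finds the maximal run starting at i (takeWhile/dropWhile);
-- `char * min(j - i, 2)` is `run.take 2`; ''.join is the concatenation of the pieces.
def pvRunGo : List Char → List Char
  | [] => []
  | c :: rest =>
      let run := (c :: rest).takeWhile (fun x => x == c)
      let rest' := (c :: rest).dropWhile (fun x => x == c)
      run.take 2 ++ pvRunGo rest'
termination_by l => l.length
decreasing_by
  simp only [List.dropWhile_cons, beq_self_eq_true]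
  exact Nat.lt_succ_of_le (List.length_dropWhile_le _ _)

def remove_duplicate_char_triplets_alt (ciphertext : String) : String :=
  String.ofList (pvRunGo ciphertext.toList)

-- ===== PRECONDITION & SPEC =====
def Spec_remove_duplicate_char_triplets (ciphertext : String) (out : String) : Prop := out = remove_duplicate_char_triplets_alt ciphertext
instance (ciphertext : String) (out : String) : Decidable (Spec_remove_duplicate_char_triplets ciphertext out) := by unfold Spec_remove_duplicate_char_triplets; infer_instance

-- ===== CLAIM (what is proved, stated in full; the proofs are below) =====
def Claim_equal_remove_duplicate_char_triplets : Prop := ∀ (ciphertext : String), Dom_remove_duplicate_char_triplets ciphertext → Spec_remove_duplicate_char_triplets ciphertext (remove_duplicate_char_triplets ciphertext)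

-- ===== LEMMAS AND PROOFS =====

-- the common reference: keep a char unless it equals both of the two kept before it
def pvKeep : Char → Char → List Char → List Char
  | _, _, [] => []
  | a, b, c :: cs => if c = b ∧ c = a then pvKeep b c cs else c :: pvKeep b c cs

def pvShrink : List Char → List Char
  | x :: y :: rest => x :: y :: pvKeep x y rest
  | l => l

-- bridging fact: if the head of d is not simultaneously equal to b and a,
-- then prefixing b and running pvKeep from state (a,b) is pvShrink of (b :: d)
lemma pvKeep_eq_shrink (a b : Char) (d : List Char)
    (h : ∀ e, d.head? = some e → ¬(e = b ∧ e = a)) :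
    b :: pvKeep a b d = pvShrink (b :: d) := by
  cases d with
  | nil => rfl
  | cons e d' =>
      have he := h e rfl
      simp [pvKeep, pvShrink, he]

-- A-side: the index loop from j+2 equals pvKeep over the suffix, given the two lookbehind chars
lemma foldA_eq (s : String) :
    ∀ (rest : List Char) (a b : Char) (j : Nat) (acc : String),
      s.toList.drop j = a :: b :: rest →
      ((PySem.List.pyRange ((j : Int) + 2) (PySem.Str.len s)).foldl (pvStepA s) acc).toList
        = acc.toList ++ pvKeep a b rest := by
  intro rest
  induction rest with
  | nil =>
      intro a b j acc hd
      have hlen : s.length = j + 2 := by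
        have := congrArg List.length hd
        simp [List.length_drop] at this
        omega
      have hempty : PySem.List.pyRange ((j : Int) + 2) (PySem.Str.len s) = [] := by
        apply List.eq_nil_of_length_eq_zero
        simp [PySem.Str.len_eq, String.length_toList, hlen]
      rw [hempty]
      simp [pvKeep]
  | cons c rs ih =>
      intro a b j acc hd
      have hlen : s.length ≥ j + 3 := by
        have := congrArg List.length hd
        simp [List.length_drop] at this
        omega
      have hlt : ((j : Int) + 2) < PySem.Str.len s := by
        simp [PySem.Str.len_eq, String.length_toList]; omega
      rw [PySem.List.pyRange_one_cons hlt]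
      have hga : s.toList[j]? = some a := by
        have : (s.toList.drop j)[0]? = some a := by rw [hd]; rfl
        simpa [List.getElem?_drop] using this
      have hgb : s.toList[j + 1]? = some b := by
        have : (s.toList.drop j)[1]? = some b := by rw [hd]; rfl
        simpa [List.getElem?_drop] using this
      have hgc : s.toList[j + 2]? = some c := by
        have : (s.toList.drop j)[2]? = some c := by rw [hd]; rfl
        simpa [List.getElem?_drop] using this
      have hstep : pvStepA s acc ((j : Int) + 2)
          = if c = b ∧ c = a then acc else acc.push c := by
        unfold pvStepA
        have g1 : PySem.Str.pyGet? s ((j : Int) + 2) = some c := by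
          have h1 : ((j : Int) + 2) = ((j + 2 : Nat) : Int) := by push_cast; ring
          rw [h1, PySem.Str.pyGet?_natCast, hgc]
        have g2 : PySem.Str.pyGet? s ((j : Int) + 2 - 1) = some b := by
          have h1 : ((j : Int) + 2 - 1) = ((j + 1 : Nat) : Int) := by push_cast; ring
          rw [h1, PySem.Str.pyGet?_natCast, hgb]
        have g3 : PySem.Str.pyGet? s ((j : Int) + 2 - 2) = some a := by
          have h1 : ((j : Int) + 2 - 2) = ((j : Nat) : Int) := by ring
          rw [h1, PySem.Str.pyGet?_natCast, hga]
        rw [g1, g2, g3]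
      have hd' : s.toList.drop (j + 1) = b :: c :: rs := by
        have h1 : s.toList.drop (j + 1) = List.drop 1 (List.drop j s.toList) := by
          rw [List.drop_drop]
        rw [h1, hd]; rfl
      have harg : ((j : Int) + 2) + 1 = (((j + 1 : Nat) : Int) + 2) := by push_cast; ring
      rw [List.foldl_cons, hstep, harg]
      by_cases hcase : c = b ∧ c = a
      · rw [if_pos hcase, ih b c (j + 1) acc hd']
        have hk : pvKeep a b (c :: rs) = pvKeep b c rs := by
          simp only [pvKeep]; rw [if_pos hcase]
        rw [hk]
      · rw [if_neg hcase, ih b c (j + 1) (acc.push c) hd', String.toList_push]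
        have hk : pvKeep a b (c :: rs) = c :: pvKeep b c rs := by
          simp only [pvKeep]; rw [if_neg hcase]
        rw [hk, List.append_assoc]
        rfl

lemma portA_eq_shrink (s : String) :
    (remove_duplicate_char_triplets s).toList = pvShrink s.toList := by
  have hslice : (PySem.Str.slice s none (some 2)).toList = s.toList.take 2 := by
    rw [PySem.Str.toList_slice]
    exact PySem.List.slice_to s.toList (by norm_num)
  unfold remove_duplicate_char_triplets
  match htl : s.toList with
  | [] =>
      have hempty : PySem.List.pyRange 2 (PySem.Str.len s) = [] := by
        apply List.eq_nil_of_length_eq_zero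
        rw [PySem.List.length_pyRange_one, PySem.Str.len_eq, htl]
        rfl
      rw [hempty, List.foldl_nil, hslice, htl]
      rfl
  | [x] =>
      have hempty : PySem.List.pyRange 2 (PySem.Str.len s) = [] := by
        apply List.eq_nil_of_length_eq_zero
        rw [PySem.List.length_pyRange_one, PySem.Str.len_eq, htl]
        rfl
      rw [hempty, List.foldl_nil, hslice, htl]
      rfl
  | a :: b :: rest =>
      have hfold := foldA_eq s rest a b 0 (PySem.Str.slice s none (some 2)) (by simpa using htl)
      rw [show ((0 : Nat) : Int) + 2 = (2 : Int) by norm_num] at hfold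
      rw [hfold, hslice, htl]
      rfl

-- replicated copies of c are all dropped by pvKeep in state (c,c)
lemma pvKeep_cc_replicate (c : Char) :
    ∀ (k : Nat) (d : List Char), pvKeep c c (List.replicate k c ++ d) = pvKeep c c d := by
  intro k
  induction k with
  | zero => intro d; rfl
  | succ k ih => intro d; simp [List.replicate_succ, pvKeep, ih]

-- B-side: the run-grouping recursion equals pvShrink
lemma pvRunGo_eq_shrink_aux :
    ∀ (n : Nat) (l : List Char), l.length ≤ n → pvRunGo l = pvShrink l := by
  intro n
  induction n with
  | zero =>
      intro l h
      have : l = [] := by cases l <;> simp_all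
      simp [this, pvRunGo, pvShrink]
  | succ n ih =>
      intro l h
      cases l with
      | nil => rw [pvRunGo]; rfl
      | cons c rest =>
          rw [pvRunGo]
          simp only [List.takeWhile_cons, List.dropWhile_cons, beq_self_eq_true, if_true]
          set t := rest.takeWhile (fun x => x == c) with ht
          set d := rest.dropWhile (fun x => x == c) with hdd
          have hrest : t ++ d = rest := List.takeWhile_append_dropWhile
          have hdlen : d.length ≤ n := by
            have h1 : d.length ≤ rest.length := List.length_dropWhile_le _ _
            simp at h
            omega
          have hih : pvRunGo d = pvShrink d := ih d hdlen
          have hhead : ∀ e d', d = e :: d' → e ≠ c := by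
            intro e d' hde hec
            have := List.head?_dropWhile_not (fun x => x == c) rest
            rw [← hdd, hde] at this
            simp at this
            exact this hec
          cases htc : t with
          | nil =>
              rw [htc] at hrest
              simp only [List.take_succ_cons, hih]
              rw [← hrest]
              simp only [List.nil_append]
              cases hdc : d with
              | nil => rfl
              | cons e d' =>
                  have hec : e ≠ c := hhead e d' hdc
                  have hs : pvShrink (e :: d') = e :: pvKeep c e d' := by
                    rw [← pvKeep_eq_shrink c e d']
                    intro f hf ⟨hfe, hfc⟩
                    exact hec (hfe ▸ hfc)
                  rw [hs]
                  rfl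
          | cons x t' =>
              have hxall : ∀ y ∈ t, y = c := by
                intro y hy
                have := List.mem_takeWhile_imp (ht ▸ hy)
                simpa using this
              have hx : x = c := hxall x (by simp [htc])
              have ht' : t' = List.replicate t'.length c :=
                List.eq_replicate_of_mem (fun y hy => hxall y (by simp [htc, hy]))
              have hkeep : pvKeep c c d = pvShrink d := by
                cases hdc : d with
                | nil => rfl
                | cons e d' =>
                    have hec : e ≠ c := hhead e d' hdc
                    have h1 : pvKeep c c (e :: d') = e :: pvKeep c e d' := by
                      simp [pvKeep, hec]
                    rw [h1, pvKeep_eq_shrink c e d']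
                    intro f hf ⟨hfe, hfc⟩
                    exact hec (hfe ▸ hfc)
              rw [← hrest, htc, hx, List.cons_append]
              show List.take 2 (c :: c :: t') ++ pvRunGo d = c :: c :: pvKeep c c (t' ++ d)
              rw [show t' ++ d = List.replicate t'.length c ++ d from by rw [← ht'],
                  pvKeep_cc_replicate, hkeep, ← hih]
              rfl

-- ===== VERDICT (by name: the statement is the Claim_ definition above) =====
theorem remove_duplicate_char_triplets_spec : Claim_equal_remove_duplicate_char_triplets := by
  intro s _
  unfold Spec_remove_duplicate_char_triplets remove_duplicate_char_triplets_alt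
  apply String.toList_inj.mp
  rw [portA_eq_shrink, pvRunGo_eq_shrink_aux s.toList.length s.toList le_rfl, String.toList_ofList]
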